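-- pv_equiv track=rewrite | github.com/EWFSC/battle_ship | battleship_functions.py | has_ship
-- ===== SOURCE A (Python) =====
-- def has_ship(grid, row_index, column_index, character, size):
--
--     """list of list of str, int, int, str, int) -> bool
--
--     Return True iff the ship appears with the correct size, completely
--     in a row or a completely in a column at the given starting
--     cell(row_index, column_index).
--
--     >>> grid = [['a','a','a'],['.','a','.'],['.','a','.']]
--     >>> has_ship(grid, 0, 1, 'a', 3)
--     True
--     >>> grid = [['a','.','a'],['.','a','.'],['a','a','a']]
--     >>> has_ship(grid, 0, 0, 'a', 3)
--     False
--
--     """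
--     number_of_row = len(grid)
--     number_of_column = len(grid[0])
--
--     #suppose there is no ship satisfied the condition
--     find_ship = False
--
--     #the number of contionous cell on right side
--     continous_number_right_side = 0
--
--     #first we can check the right side of the starting point
--     #check the cell on the right of the cell
--     #if the number of continous equals to the ship size
--     #then we find a ship
--     #if the element is not the character, then the continous number must reset.
--     for i in range(column_index, number_of_column):
--         if grid[row_index][i] == character:
--             continous_number_right_side += 1
--             if (continous_number_right_side == size):
--                 find_ship = True
--         else:
--             continous_number_right_side = 0
--
--     #now we should check the bottom of the starting point
--     #the rest part is similar to the part above
--     continous_number_bottom_side = 0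
--     for i in range(row_index, number_of_row):
--         if grid[i][column_index] == character:
--             continous_number_bottom_side += 1
--             if (continous_number_bottom_side == size):
--                     find_ship = True
--         else:
--             continous_number_bottom_side = 0
--
--     return find_ship
-- ===== SOURCE B (Python) =====
-- def has_ship(grid, row_index, column_index, character, size):
--     # Sliding-window reformulation: a ship of a positive size exists iff some
--     # length-`size` window of the scanned row cells or the scanned column cells
--     # consists entirely of `character`.
--     if size <= 0:
--         return False
--     lines = [[grid[row_index][i] for i in range(column_index, len(grid[0]))],
--              [grid[i][column_index] for i in range(row_index, len(grid))]]
--     return any(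
--         all(cell == character for cell in line[i:i + size])
--         for line in lines
--         for i in range(len(line) - size + 1)
--     )
-- ===== Notes on version B (the rewrite author's own statement) =====
-- stated objective: idiomatic
-- what changed: Replaces A's two running-counter-with-reset loops (shared flag, counter compared to size on every match) with a guard for non-positive size plus a sliding-window test: collect the scanned row cells and column cells and return whether any length-size window of either consists entirely of the character.
import Mathlib
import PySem

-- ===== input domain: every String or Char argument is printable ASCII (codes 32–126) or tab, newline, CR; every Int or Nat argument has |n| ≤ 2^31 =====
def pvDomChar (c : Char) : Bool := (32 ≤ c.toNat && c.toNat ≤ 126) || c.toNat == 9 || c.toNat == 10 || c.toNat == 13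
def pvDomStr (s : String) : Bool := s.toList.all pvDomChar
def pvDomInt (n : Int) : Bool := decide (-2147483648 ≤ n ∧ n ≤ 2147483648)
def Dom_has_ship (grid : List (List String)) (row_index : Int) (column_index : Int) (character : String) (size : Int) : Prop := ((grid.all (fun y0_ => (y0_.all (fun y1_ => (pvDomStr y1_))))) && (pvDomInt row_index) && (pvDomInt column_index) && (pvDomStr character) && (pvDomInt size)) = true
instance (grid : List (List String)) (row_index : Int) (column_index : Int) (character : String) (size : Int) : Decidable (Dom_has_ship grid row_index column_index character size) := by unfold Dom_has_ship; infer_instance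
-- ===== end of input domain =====

-- B replaces A's two running-counter-with-reset loops by a guard for non-positive size
-- plus a sliding-window test over the row suffix and the column suffix (objective: idiomatic).

-- ===== PORT A =====
-- loop body of both of A's counting loops: on a match increment the counter and set the
-- flag when the counter equals size; otherwise reset the counter
def stepA (character : String) (size : Int) (st : Bool × Int) (cell : String) : Bool × Int :=
  if cell = character then
    (if st.2 + 1 = size then true else st.1, st.2 + 1)
  else (st.1, 0)

def has_ship (grid : List (List String)) (row_index : Int) (column_index : Int) (character : String) (size : Int) : Bool :=
  let number_of_row : Int := grid.length
  let number_of_column : Int := (((PySem.List.pyGet? grid 0).getD []).length : Int)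
  -- first loop: along the row, cells grid[row_index][i] for i in range(column_index, number_of_column)
  let st1 : Bool × Int :=
    (PySem.List.pyRange column_index number_of_column 1).foldl
      (fun st i => stepA character size st
        (PySem.List.pyGetD (PySem.List.pyGetD grid row_index []) i ""))
      (false, 0)
  -- second loop: down the column, cells grid[i][column_index] for i in range(row_index, number_of_row)
  let st2 : Bool × Int :=
    (PySem.List.pyRange row_index number_of_row 1).foldl
      (fun st i => stepA character size st
        (PySem.List.pyGetD (PySem.List.pyGetD grid i []) column_index ""))
      (st1.1, 0)
  st2.1

-- ===== PORT B =====
def has_ship_alt (grid : List (List String)) (row_index : Int) (column_index : Int) (character : String) (size : Int) : Bool :=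
  if size ≤ 0 then false
  else
    let lines : List (List String) :=
      [(PySem.List.pyRange column_index ((((PySem.List.pyGet? grid 0).getD []).length : Int)) 1).map
         (fun i => PySem.List.pyGetD (PySem.List.pyGetD grid row_index []) i ""),
       (PySem.List.pyRange row_index ((grid.length : Int)) 1).map
         (fun i => PySem.List.pyGetD (PySem.List.pyGetD grid i []) column_index "")]
    lines.any (fun line =>
      (PySem.List.pyRange 0 ((line.length : Int) - size + 1) 1).any (fun i =>
        (PySem.List.slice line (some i) (some (i + size))).all (fun cell => cell == character)))

-- ===== PRECONDITION & SPEC =====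
-- Pre_ excludes exactly the inputs on which Python A raises IndexError: an empty grid,
-- or a scanned cell whose row or column index is out of range for the (possibly ragged) grid.
def Pre_has_ship (grid : List (List String)) (row_index : Int) (column_index : Int) (character : String) (size : Int) : Prop :=
  grid ≠ [] ∧
  (column_index < ((grid.headD []).length : Int) →
     PySem.Raise.InRange grid.length row_index ∧
     -(((PySem.List.pyGetD grid row_index []).length : Int)) ≤ column_index ∧
     ((grid.headD []).length : Int) ≤ ((PySem.List.pyGetD grid row_index []).length : Int)) ∧
  (row_index < (grid.length : Int) →
     -(grid.length : Int) ≤ row_index ∧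
     ∀ r ∈ (if 0 ≤ row_index then grid.drop row_index.toNat else grid),
       PySem.Raise.InRange r.length column_index)
instance (grid : List (List String)) (row_index : Int) (column_index : Int) (character : String) (size : Int) : Decidable (Pre_has_ship grid row_index column_index character size) := by unfold Pre_has_ship; infer_instance

def pvWitness_has_ship : List (List String) × Int × Int × String × Int :=
  ([["a", "."], [".", "a"]], 0, 1, "a", 1)

def Spec_has_ship (grid : List (List String)) (row_index : Int) (column_index : Int) (character : String) (size : Int) (out : Bool) : Prop := out = has_ship_alt grid row_index column_index character size
instance (grid : List (List String)) (row_index : Int) (column_index : Int) (character : String) (size : Int) (out : Bool) : Decidable (Spec_has_ship grid row_index column_index character size out) := by unfold Spec_has_ship; infer_instance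

-- ===== CLAIM (what is proved, stated in full; the proofs are below) =====
def Claim_equal_has_ship : Prop := ∀ (grid : List (List String)) (row_index : Int) (column_index : Int) (character : String) (size : Int), Dom_has_ship grid row_index column_index character size → Pre_has_ship grid row_index column_index character size → Spec_has_ship grid row_index column_index character size (has_ship grid row_index column_index character size)

-- ===== LEMMAS AND PROOFS =====

-- goodRun ch k l : the first k cells of l exist and all equal ch
def goodRun (ch : String) : Nat → List String → Bool
  | 0, _ => true
  | _ + 1, [] => false
  | k + 1, x :: xs => (x = ch) && goodRun ch k xs

-- hasRun ch k l : some k consecutive cells of l all equal ch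
def hasRun (ch : String) (k : Nat) : List String → Bool
  | [] => false
  | x :: xs => goodRun ch k (x :: xs) || hasRun ch k xs

theorem goodRun_gt_len (ch : String) : ∀ (l : List String) (k : Nat), l.length < k → goodRun ch k l = false := by
  intro l
  induction l with
  | nil => intro k hk; cases k with
    | zero => omega
    | succ k => simp [goodRun]
  | cons x xs ih =>
    intro k hk
    cases k with
    | zero => omega
    | succ k =>
      simp only [goodRun, Bool.and_eq_false_imp]
      rw [ih k (by simpa using hk)]
      simp

theorem goodRun_eq_take (ch : String) : ∀ (l : List String) (k : Nat), k ≤ l.length → goodRun ch k l = (l.take k).all (fun c => c == ch) := by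
  intro l
  induction l with
  | nil =>
    intro k hk
    have hk0 : k = 0 := by simpa using hk
    subst hk0; simp [goodRun]
  | cons x xs ih =>
    intro k hk
    cases k with
    | zero => rfl
    | succ k =>
      simp only [goodRun, List.take_succ_cons, List.all_cons]
      rw [ih k (by simpa using hk)]
      have hb : (x == ch) = decide (x = ch) := by by_cases h : x = ch <;> simp [h]
      rw [hb]

theorem goodRun_mono (ch : String) : ∀ (l : List String) (j k : Nat), j ≤ k → goodRun ch k l = true → goodRun ch j l = true := by
  intro l
  induction l with
  | nil =>
    intro j k hjk hg
    cases k with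
    | zero => interval_cases j; exact hg
    | succ k => simp [goodRun] at hg
  | cons x xs ih =>
    intro j k hjk hg
    cases j with
    | zero => simp [goodRun]
    | succ j =>
      cases k with
      | zero => omega
      | succ k =>
        simp only [goodRun, Bool.and_eq_true] at hg ⊢
        exact ⟨hg.1, ih j k (by omega) hg.2⟩

theorem goodRun_imp_hasRun (ch : String) (k : Nat) (hk : 1 ≤ k) (l : List String) (hg : goodRun ch k l = true) : hasRun ch k l = true := by
  cases l with
  | nil =>
    cases k with
    | zero => omega
    | succ k => simp [goodRun] at hg
  | cons x xs => simp [hasRun, hg]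

theorem hasRun_gt_len (ch : String) (k : Nat) : ∀ (l : List String), l.length < k → hasRun ch k l = false := by
  intro l
  induction l with
  | nil => intro _; simp [hasRun]
  | cons x xs ih =>
    intro hk
    simp only [hasRun, Bool.or_eq_false_iff]
    exact ⟨goodRun_gt_len ch _ k (by simpa using hk), ih (by simp at hk ⊢; omega)⟩

-- the window-existence part of B, on Nat ranges, equals hasRun
theorem range_any_eq_hasRun (ch : String) (k : Nat) (hk : 1 ≤ k) : ∀ (l : List String),
    (List.range (l.length + 1 - k)).any (fun j => ((l.drop j).take k).all (fun c => c == ch)) = hasRun ch k l := by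
  intro l
  induction l with
  | nil =>
    have : 0 + 1 - k = 0 := by omega
    simp [this, hasRun]
  | cons x xs ih =>
    by_cases hfit : k ≤ xs.length + 1
    · have hb : (x :: xs).length + 1 - k = (xs.length + 1 - k) + 1 := by simp; omega
      rw [hb, List.range_succ_eq_map]
      simp only [List.any_cons, List.any_map, Function.comp_def]
      have h0 : ((x :: xs).drop 0).take k = (x :: xs).take k := by simp
      rw [h0]
      have hr : ∀ j : Nat, ((x :: xs).drop (j + 1)).take k = ((xs.drop j).take k) := by
        intro j; simp
      simp only [hr]
      rw [ih]
      simp only [hasRun]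
      rw [goodRun_eq_take ch _ k (by simpa using hfit)]
    · have hb : (x :: xs).length + 1 - k = 0 := by simp; omega
      rw [hb]
      simp only [List.range_zero, List.any_nil]
      rw [hasRun_gt_len ch k _ (by simp; omega)]

-- B's per-line window test equals hasRun
theorem win_eq_hasRun (ch : String) (k : Nat) (hk : 1 ≤ k) (l : List String) :
    ((PySem.List.pyRange 0 ((l.length : Int) - (k : Int) + 1) 1).any (fun i =>
      (PySem.List.slice l (some i) (some (i + (k : Int)))).all (fun cell => cell == ch))) = hasRun ch k l := by
  rw [PySem.List.pyRange_one]
  simp only [List.any_map, Function.comp_def, zero_add]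
  have hb : (((l.length : Int) - (k : Int) + 1) - 0).toNat = l.length + 1 - k := by omega
  rw [hb]
  have hsl : ∀ j : Nat, PySem.List.slice l (some ((j : Nat) : Int)) (some (((j : Nat) : Int) + (k : Int))) = (l.drop j).take k :=
    fun j => PySem.List.slice_natCast_add l j k
  simp only [hsl]
  exact range_any_eq_hasRun ch k hk l

-- A's flag, once set, stays set
theorem loopA_true (ch : String) (size : Int) : ∀ (cells : List String) (c : Int),
    (cells.foldl (stepA ch size) (true, c)).1 = true := by
  intro cells
  induction cells with
  | nil => intro c; rfl
  | cons x xs ih =>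
    intro c
    simp only [List.foldl_cons, stepA]
    split_ifs <;> simp [ih]

-- with non-positive size the flag never fires
theorem loopA_nonpos (ch : String) (size : Int) (hs : size ≤ 0) : ∀ (cells : List String) (c : Int), 0 ≤ c →
    (cells.foldl (stepA ch size) (false, c)).1 = false := by
  intro cells
  induction cells with
  | nil => intro c _; rfl
  | cons x xs ih =>
    intro c hc
    simp only [List.foldl_cons, stepA]
    split_ifs with h1 h2
    · omega
    · exact ih (c + 1) (by omega)
    · exact ih 0 le_rfl

-- main invariant for A's counting loop
theorem loopA_main (ch : String) (size : Int) (k : Nat) (hk : 1 ≤ k) (hsz : size = (k : Int)) :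
    ∀ (cells : List String) (c : Nat), c < k →
    (cells.foldl (stepA ch size) (false, (c : Int))).1 = (goodRun ch (k - c) cells || hasRun ch k cells) := by
  intro cells
  induction cells with
  | nil =>
    intro c hc
    have h1 : goodRun ch (k - c) ([] : List String) = false := goodRun_gt_len ch [] (k - c) (by simp; omega)
    simp [h1, hasRun]
  | cons x xs ih =>
    intro c hc
    simp only [List.foldl_cons, stepA]
    by_cases hx : x = ch
    · rw [if_pos hx]
      by_cases hcs : (c : Int) + 1 = size
      · rw [if_pos hcs]
        rw [loopA_true]
        have hkc : k - c = 1 := by omega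
        have hg : goodRun ch (k - c) (x :: xs) = true := by
          rw [hkc]; simp [goodRun, hx]
        simp [hg]
      · rw [if_neg hcs]
        have hc1 : c + 1 < k := by omega
        have : ((c : Int) + 1) = ((c + 1 : Nat) : Int) := by push_cast; ring
        rw [this, ih (c + 1) hc1]
        simp only [hasRun]
        have hgc : goodRun ch (k - c) (x :: xs) = goodRun ch (k - (c + 1)) xs := by
          have h2 : k - c = (k - (c + 1)) + 1 := by omega
          rw [h2]; simp [goodRun, hx]
        have hgk : goodRun ch k (x :: xs) = goodRun ch (k - 1) xs := by
          have : k = (k - 1) + 1 := by omega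
          rw [this]; simp only [goodRun]; rw [← this]; simp [hx]
        rw [hgc, hgk]
        cases hgood : goodRun ch (k - 1) xs with
        | false => simp
        | true =>
          have := goodRun_mono ch xs (k - (c + 1)) (k - 1) (by omega) hgood
          simp [this]
    · rw [if_neg hx]
      rw [show ((0 : Int)) = ((0 : Nat) : Int) by norm_num, ih 0 (by omega)]
      simp only [Nat.sub_zero, hasRun]
      have hgk : goodRun ch k (x :: xs) = false := by
        have h2 : k = (k - 1) + 1 := by omega
        rw [h2]; simp [goodRun, hx]
      have hgc : goodRun ch (k - c) (x :: xs) = false := by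
        have h2 : k - c = (k - c - 1) + 1 := by omega
        rw [h2]; simp [goodRun, hx]
      rw [hgk, hgc]
      cases hgood : goodRun ch k xs with
      | false => simp
      | true => rw [goodRun_imp_hasRun ch k hk xs hgood]; simp

-- the whole of A's loop (flag starting false, counter 0) computes hasRun
theorem loopA_eq_hasRun (ch : String) (size : Int) (k : Nat) (hk : 1 ≤ k) (hsz : size = (k : Int)) (cells : List String) :
    (cells.foldl (stepA ch size) (false, 0)).1 = hasRun ch k cells := by
  have h := loopA_main ch size k hk hsz cells 0 (by omega)
  simp only [Nat.cast_zero, Nat.sub_zero] at h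
  rw [h]
  cases hgood : goodRun ch k cells with
  | false => simp
  | true => rw [goodRun_imp_hasRun ch k hk cells hgood]; simp

-- flag threading of A's two loops versus B's window tests, over arbitrary cell lists
theorem loops_eq_windows (ch : String) (size : Int) (c1 c2 : List String) :
    (c2.foldl (stepA ch size) ((c1.foldl (stepA ch size) (false, 0)).1, 0)).1
      = if size ≤ 0 then false
        else [c1, c2].any (fun line =>
          (PySem.List.pyRange 0 ((line.length : Int) - size + 1) 1).any (fun i =>
            (PySem.List.slice line (some i) (some (i + size))).all (fun cell => cell == ch))) := by
  by_cases hs : size ≤ 0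
  · rw [if_pos hs, loopA_nonpos ch size hs _ 0 le_rfl]
    exact loopA_nonpos ch size hs _ 0 le_rfl
  · rw [if_neg hs]
    set k : Nat := size.toNat with hkdef
    have hk1 : 1 ≤ k := by omega
    have hsz : size = (k : Int) := by omega
    rw [loopA_eq_hasRun ch size k hk1 hsz c1]
    have h2 := loopA_main ch size k hk1 hsz c2 0 (by omega)
    simp only [Nat.cast_zero, Nat.sub_zero] at h2
    cases hflag : hasRun ch k c1 with
    | true =>
      rw [loopA_true]
      simp only [List.any_cons, List.any_nil, Bool.or_false]
      rw [hsz, win_eq_hasRun ch k hk1, hflag]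
      simp
    | false =>
      rw [h2]
      simp only [List.any_cons, List.any_nil, Bool.or_false]
      rw [hsz, win_eq_hasRun ch k hk1, win_eq_hasRun ch k hk1, hflag]
      cases hgood : goodRun ch k c2 with
      | false => simp
      | true => rw [goodRun_imp_hasRun ch k hk1 _ hgood]; simp

theorem has_ship_spec : Claim_equal_has_ship := by
  intro grid row_index column_index character size _hdom _hpre
  simp only [Spec_has_ship, has_ship, has_ship_alt]
  have hfold : ∀ (l : List Int) (f : Int → String) (init : Bool × Int),
      l.foldl (fun st i => stepA character size st (f i)) init
        = (l.map f).foldl (stepA character size) init :=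
    by intro l f init; rw [List.foldl_map]
  rw [hfold, hfold]
  exact loops_eq_windows character size _ _
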